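-- pv_equiv track=rewrite | github.com/suddi/coding-challenges | src/strings/longest_substring.py | solution
-- ===== SOURCE A (Python) =====
-- def solution(S):
--     """
--     Given that a valid password requires an upper case character and must not contain a digit.
--     Write a function to compute the longest valid password from a given string.
--     eg. "a0B0cdAg1", longest valid password is "cdAg".
--
--     >>> solution('aabb2323Afefv424')
--     5
--     >>> solution('a0B0cdAg1')
--     4
--     """
--     password_length = 0                                             # O(1)
--     password_valid = False                                          # O(1)
--     password_lengths = []                                           # O(1)
--
--     def validate_password():
--         if password_valid:                                          # O(1)
--             password_lengths.append(password_length)                # O(1)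
--         return password_lengths                                     # O(1)
--
--     for value in S:                                                 # O(N)
--         if value.isupper():                                         # O(1)
--             password_valid = True                                   # O(1)
--             password_length += 1                                    # O(1)
--         elif value.isdigit():                                       # O(1)
--             validate_password()                                     # O(1)
--             password_valid = False                                  # O(1)
--             password_length = 0                                     # O(1)
--         else:                                                       # O(1)
--             password_length += 1                                    # O(1)
--
--     validate_password()                                             # O(1)
--     max_len = -1                                                    # O(1)
--     for length in password_lengths:                                 # O(<N)
--         if length > max_len:                                        # O(1)
--             max_len = length                                        # O(1)
--     return max_len                                                  # O(1)
-- ===== SOURCE B (Python) =====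
-- def solution(S):
--     # Two-phase: materialize digit-separated segments, then take the max length
--     # among segments containing an uppercase letter (default -1).
--     segments = []
--     cur = ''
--     for ch in S:
--         if ch.isdigit():
--             segments.append(cur)
--             cur = ''
--         else:
--             cur += ch
--     segments.append(cur)
--     return max((len(seg) for seg in segments if any(c.isupper() for c in seg)), default=-1)
-- ===== Notes on version B (the rewrite author's own statement) =====
-- stated objective: simpler
-- what changed: Replaces A's running counter + validity flag + nested validate_password closure with a two-phase scan: first split the string into digit-separated segments, then a single max over the lengths of segments containing an uppercase letter (default -1).
import Mathlib
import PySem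

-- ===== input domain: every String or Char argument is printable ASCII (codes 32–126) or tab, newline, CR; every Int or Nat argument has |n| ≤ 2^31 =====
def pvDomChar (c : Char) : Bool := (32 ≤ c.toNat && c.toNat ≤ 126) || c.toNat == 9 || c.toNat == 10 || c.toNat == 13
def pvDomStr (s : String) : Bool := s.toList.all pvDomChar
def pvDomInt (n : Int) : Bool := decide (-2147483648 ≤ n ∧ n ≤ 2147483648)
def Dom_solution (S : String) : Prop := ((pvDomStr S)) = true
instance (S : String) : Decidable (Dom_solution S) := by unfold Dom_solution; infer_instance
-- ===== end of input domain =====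

-- B replaces A's running counter + validity flag with a two-phase scan (split into
-- digit-separated segments, then max length of segments containing an uppercase); objective: simpler.

-- ===== PORT A =====
-- state = (password_length, password_valid, password_lengths); validate_password is inlined
-- at its two call sites exactly as A executes it.
def solutionStep (st : Int × Bool × List Int) (c : Char) : Int × Bool × List Int :=
  if PySem.Chars.isupper c then (st.1 + 1, true, st.2.2)
  else if PySem.Chars.isdigit c then
    (0, false, if st.2.1 then st.2.2 ++ [st.1] else st.2.2)
  else (st.1 + 1, st.2.1, st.2.2)

def solution (S : String) : Int :=
  let st := S.toList.foldl solutionStep (0, false, [])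
  let lengths := if st.2.1 then st.2.2 ++ [st.1] else st.2.2
  lengths.foldl (fun m l => if l > m then l else m) (-1)

-- ===== PORT B =====
-- state = (segments, cur); then max(..., default=-1) over lengths of uppercase-containing segments.
def solutionAltStep (p : List (List Char) × List Char) (c : Char) : List (List Char) × List Char :=
  if PySem.Chars.isdigit c then (p.1 ++ [p.2], []) else (p.1, p.2 ++ [c])

def solution_alt (S : String) : Int :=
  let p := S.toList.foldl solutionAltStep ([], [])
  let segments := p.1 ++ [p.2]
  let lens := (segments.filter (fun seg => seg.any PySem.Chars.isupper)).map
      (fun seg => (seg.length : Int))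
  (PySem.List.max? lens (fun y => y)).getD (-1)

-- ===== PRECONDITION & SPEC =====
def Spec_solution (S : String) (out : Int) : Prop := out = solution_alt S
instance (S : String) (out : Int) : Decidable (Spec_solution S out) := by unfold Spec_solution; infer_instance

-- ===== CLAIM (what is proved, stated in full; the proofs are below) =====
def Claim_equal_solution : Prop := ∀ (S : String), Dom_solution S → Spec_solution S (solution S)

-- ===== LEMMAS AND PROOFS =====

-- lengths of the uppercase-containing segments, in order (A's password_lengths list)
def segLens (segs : List (List Char)) : List Int :=
  (segs.filter (fun s => s.any PySem.Chars.isupper)).map (fun s => (s.length : Int))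

lemma digit_not_upper (c : Char) (h : PySem.Chars.isdigit c = true) :
    PySem.Chars.isupper c = false := by
  have h1 : ('0':Char) ≤ c ∧ c ≤ '9' := by simpa [PySem.Chars.isdigit] using h
  by_contra hu
  have h2 : ('A':Char) ≤ c := by
    simp only [PySem.Chars.isupper, Bool.not_eq_false, Bool.and_eq_true, decide_eq_true_eq] at hu
    exact hu.1
  exact absurd (le_trans h2 h1.2) (by decide)

lemma segLens_append_singleton (segs : List (List Char)) (cur : List Char) :
    segLens (segs ++ [cur]) =
      if cur.any PySem.Chars.isupper then segLens segs ++ [(cur.length : Int)]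
      else segLens segs := by
  by_cases h : cur.any PySem.Chars.isupper <;>
    simp [segLens, List.filter_append, h]

-- the two folds stay in lockstep: A's state is determined by B's state
lemma loop_rel (cs : List Char) : ∀ (segs : List (List Char)) (cur : List Char),
    cs.foldl solutionStep ((cur.length : Int), cur.any PySem.Chars.isupper, segLens segs)
      = (((cs.foldl solutionAltStep (segs, cur)).2.length : Int),
         (cs.foldl solutionAltStep (segs, cur)).2.any PySem.Chars.isupper,
         segLens (cs.foldl solutionAltStep (segs, cur)).1) := by
  induction cs with
  | nil => intro segs cur; rfl
  | cons c t ih =>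
    intro segs cur
    by_cases hd : PySem.Chars.isdigit c = true
    · have hu := digit_not_upper c hd
      have h1 : solutionStep ((cur.length : Int), cur.any PySem.Chars.isupper, segLens segs) c
          = (0, false, segLens (segs ++ [cur])) := by
        simp [solutionStep, hd, hu, segLens_append_singleton]
      have h2 : solutionAltStep (segs, cur) c = (segs ++ [cur], []) := by
        simp [solutionAltStep, hd]
      simpa [List.foldl_cons, h1, h2] using ih (segs ++ [cur]) []
    · have h2 : solutionAltStep (segs, cur) c = (segs, cur ++ [c]) := by
        simp [solutionAltStep, hd]
      by_cases hu : PySem.Chars.isupper c = true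
      · have h1 : solutionStep ((cur.length : Int), cur.any PySem.Chars.isupper, segLens segs) c
            = (((cur ++ [c]).length : Int), (cur ++ [c]).any PySem.Chars.isupper, segLens segs) := by
          simp [solutionStep, hu, List.any_append]
        simpa [List.foldl_cons, h1, h2] using ih segs (cur ++ [c])
      · have h1 : solutionStep ((cur.length : Int), cur.any PySem.Chars.isupper, segLens segs) c
            = (((cur ++ [c]).length : Int), (cur ++ [c]).any PySem.Chars.isupper, segLens segs) := by
          simp [solutionStep, hu, hd, List.any_append]
        simpa [List.foldl_cons, h1, h2] using ih segs (cur ++ [c])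

-- A's final running-max loop computes max(xs, default=-1) when all elements are ≥ 0
lemma final_max (xs : List Int) (hnn : ∀ x ∈ xs, 0 ≤ x) :
    xs.foldl (fun m l => if l > m then l else m) (-1)
      = (PySem.List.max? xs (fun y => y)).getD (-1) := by
  have hstep : (fun (m l : Int) => if l > m then l else m) = fun m l => max m l := by
    funext m l; split <;> omega
  cases xs with
  | nil => simp [PySem.List.max?]
  | cons x t =>
    rw [PySem.List.max?_id_cons]
    have hx : (0:Int) ≤ x := hnn x (by simp)
    simp only [List.foldl_cons, hstep, Option.getD_some]
    have : max (-1 : Int) x = x := by omega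
    rw [this]

-- ===== VERDICT (by name: the statement is the Claim_ definition above) =====
theorem solution_spec : Claim_equal_solution := by
  intro S _
  unfold Spec_solution solution solution_alt
  have h0 := loop_rel S.toList [] []
  simp only [List.length_nil, Nat.cast_zero, List.any_nil] at h0
  rw [show (segLens [] : List Int) = [] from rfl] at h0
  rw [h0]
  set p := S.toList.foldl solutionAltStep ([], []) with hp
  have hlen : (if (p.2.any PySem.Chars.isupper) then segLens p.1 ++ [(p.2.length : Int)] else segLens p.1)
      = segLens (p.1 ++ [p.2]) := (segLens_append_singleton p.1 p.2).symm
  simp only [hlen]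
  rw [final_max]
  · rfl
  · intro x hx
    simp only [segLens, List.mem_map] at hx
    obtain ⟨s, _, rfl⟩ := hx
    positivity
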